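-- pv_equiv track=rewrite | github.com/luciamacaggi/guia_caja_blanca | p8.py | muchas_palabras
-- ===== SOURCE A (Python) =====
-- def muchas_palabras(l: list) -> bool:
--     check = []
--     for i in range(len(l)):
--         if len(l[i]) > 7:
--             check.append(True)
--         else:
--             check.append(False)
--     return any(check)
-- ===== SOURCE B (Python) =====
-- def muchas_palabras(l: list) -> bool:
--     return max(map(len, l), default=0) > 7
-- ===== Notes on version B (the rewrite author's own statement) =====
-- stated objective: simpler
-- what changed: Instead of building a boolean list over indices and OR-ing it with any(), B reduces the list to a single running maximum of word lengths (max with default 0) and compares it once against 7.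
import Mathlib
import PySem

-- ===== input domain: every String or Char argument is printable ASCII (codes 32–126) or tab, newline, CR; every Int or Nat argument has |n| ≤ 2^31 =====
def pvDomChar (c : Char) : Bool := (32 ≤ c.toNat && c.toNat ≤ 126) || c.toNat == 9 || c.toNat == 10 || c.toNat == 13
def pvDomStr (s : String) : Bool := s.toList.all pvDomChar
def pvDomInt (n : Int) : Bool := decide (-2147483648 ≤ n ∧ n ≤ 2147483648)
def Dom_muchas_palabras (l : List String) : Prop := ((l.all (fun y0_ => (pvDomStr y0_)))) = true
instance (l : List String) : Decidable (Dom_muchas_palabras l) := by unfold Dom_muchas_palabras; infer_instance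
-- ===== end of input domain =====

-- B replaces A's boolean list + any() with a single running maximum of word lengths compared once against 7 (simpler, O(1) extra space).

-- ===== PORT A =====
def muchas_palabras (l : List String) : Bool :=
  let check := (PySem.List.pyRange 0 (PySem.List.len l) 1).foldl
    (fun acc i =>
      if PySem.Str.len (PySem.List.pyGetD l i "") > 7 then acc ++ [true] else acc ++ [false])
    ([] : List Bool)
  check.any id

-- ===== PORT B =====
def muchas_palabras_alt (l : List String) : Bool :=
  decide (PySem.List.maxD (l.map PySem.Str.len) (fun x => x) 0 > 7)

-- ===== PRECONDITION & SPEC =====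
def Spec_muchas_palabras (l : List String) (out : Bool) : Prop := out = muchas_palabras_alt l
instance (l : List String) (out : Bool) : Decidable (Spec_muchas_palabras l out) := by unfold Spec_muchas_palabras; infer_instance

-- ===== CLAIM (what is proved, stated in full; the proofs are below) =====
def Claim_equal_muchas_palabras : Prop := ∀ (l : List String), Dom_muchas_palabras l → Spec_muchas_palabras l (muchas_palabras l)

-- ===== LEMMAS AND PROOFS =====

-- A's loop appends decide (7 < len s) for each word s
theorem foldl_check_eq_map (l : List String) (acc : List Bool) :
    l.foldl
      (fun acc s => if PySem.Str.len s > 7 then acc ++ [true] else acc ++ [false]) acc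
      = acc ++ l.map (fun s => decide (7 < PySem.Str.len s)) := by
  have hf : (fun (acc : List Bool) (s : String) =>
      if PySem.Str.len s > 7 then acc ++ [true] else acc ++ [false])
      = fun acc s => acc ++ [decide (7 < PySem.Str.len s)] := by
    funext acc s
    simp only [PySem.Str.len_eq, gt_iff_lt]
    by_cases h : (7 : Int) < s.length <;> simp [h]
  rw [hf, PySem.List.foldl_append_singleton_eq_map]

-- the running max exceeds 7 iff some element does
theorem lt_foldl_max_iff (t : List Int) (x : Int) :
    7 < t.foldl max x ↔ 7 < x ∨ ∃ y ∈ t, 7 < y := by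
  constructor
  · intro h
    rcases PySem.List.foldl_max_mem t x with he | he
    · left; omega
    · right; exact ⟨_, he, h⟩
  · intro h
    rcases h with h | ⟨y, hy, h7⟩
    · have := (PySem.List.le_foldl_max t x).1; omega
    · have := (PySem.List.le_foldl_max t x).2 y hy; omega

-- B computes "some length exceeds 7"
theorem alt_eq_any (xs : List Int) :
    decide (PySem.List.maxD xs (fun x => x) 0 > 7) = xs.any (fun x => decide (7 < x)) := by
  cases xs with
  | nil => rfl
  | cons x t =>
    simp only [PySem.List.maxD, PySem.List.max?_id_cons, Option.getD_some]
    rw [Bool.eq_iff_iff]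
    simp only [decide_eq_true_eq, List.any_eq_true, gt_iff_lt, lt_foldl_max_iff, List.mem_cons]
    constructor
    · rintro (h | ⟨y, hy, h7⟩)
      · exact ⟨x, Or.inl rfl, h⟩
      · exact ⟨y, Or.inr hy, h7⟩
    · rintro ⟨y, (rfl | hy), h7⟩
      · exact Or.inl h7
      · exact Or.inr ⟨y, hy, h7⟩

-- ===== VERDICT (by name: the statement is the Claim_ definition above) =====
theorem muchas_palabras_spec : Claim_equal_muchas_palabras := by
  intro l _
  show muchas_palabras l = muchas_palabras_alt l
  unfold muchas_palabras muchas_palabras_alt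
  dsimp only
  rw [show PySem.List.len l = (l.length : Int) from PySem.List.len_eq l,
      PySem.List.foldl_pyRange_zero_pyGetD' l "" (fun acc s =>
        if PySem.Str.len s > 7 then acc ++ [true] else acc ++ [false]) ([] : List Bool),
      foldl_check_eq_map, alt_eq_any]
  simp [List.any_map, Function.comp_def, PySem.Str.len_eq]
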